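-- pv_equiv track=rewrite | github.com/LQY-hh/VLA-autonomous-driving-trajectory | src/input/multi_camera_handler.py | synchronize_frames
-- ===== SOURCE A (Python) =====
-- from typing import List, Dict, Tuple, Optional
--
-- def synchronize_frames(camera_images: Dict[str, List[str]]) -> List[Dict[str, str]]:
--     """
--     同步不同摄像头的帧
--
--     Args:
--         camera_images: 摄像头名称到图像路径列表的映射
--
--     Returns:
--         同步后的帧列表，每个元素是摄像头名称到图像路径的映射
--     """
--     if not camera_images:
--         return []
--
--     # 获取所有摄像头的图像数量
--     min_frames = min(len(images) for images in camera_images.values())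
--
--     synchronized_frames = []
--     for i in range(min_frames):
--         frame = {}
--         for camera_name, images in camera_images.items():
--             if i < len(images):
--                 frame[camera_name] = images[i]
--         synchronized_frames.append(frame)
--
--     return synchronized_frames
-- ===== SOURCE B (Python) =====
-- def synchronize_frames(camera_images):
--     # Camera-wise accumulation: fold over cameras, growing each frame dict by
--     # one key per camera; zip's truncation to the shorter side implements the
--     # minimum-length cut without ever computing it.
--     frames = None
--     for name, images in camera_images.items():
--         if frames is None:
--             frames = [{name: img} for img in images]
--         else:
--             frames = [{**f, name: img} for f, img in zip(frames, images)]
--     return [] if frames is None else frames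
-- ===== Notes on version B (the rewrite author's own statement) =====
-- stated objective: alternative
-- what changed: Inverts the loop nesting: instead of computing min_frames and building each frame by scanning all cameras at index i, B folds over the cameras once, maintaining a list of partially built frame dicts that it zips (and thereby truncates) against each camera's image list, so the minimum length is never computed explicitly.
import Mathlib
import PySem

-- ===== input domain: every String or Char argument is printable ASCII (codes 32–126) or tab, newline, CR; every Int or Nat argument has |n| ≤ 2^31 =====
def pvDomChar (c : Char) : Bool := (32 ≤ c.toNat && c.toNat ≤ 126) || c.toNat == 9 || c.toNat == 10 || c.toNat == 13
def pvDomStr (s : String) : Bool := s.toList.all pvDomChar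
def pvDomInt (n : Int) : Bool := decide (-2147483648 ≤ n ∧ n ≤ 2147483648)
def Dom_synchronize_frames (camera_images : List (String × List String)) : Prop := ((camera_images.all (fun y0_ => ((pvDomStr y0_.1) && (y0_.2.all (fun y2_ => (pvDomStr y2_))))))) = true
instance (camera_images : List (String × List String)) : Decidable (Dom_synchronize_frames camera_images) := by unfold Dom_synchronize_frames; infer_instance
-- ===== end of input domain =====

-- B inverts A's loop nesting: it folds once over the cameras, growing a list of
-- partial frame dicts, with zip-truncation replacing the explicit min computation
-- (alternative decomposition; same cost).

-- ===== PORT A =====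
-- min(len(images) for images in camera_images.values()), seeded from the first element
def pvMinLen (lens : List Nat) : Nat := lens.foldl Nat.min (lens.headD 0)

def synchronize_frames (camera_images : List (String × List String)) : List (List (String × String)) :=
  if camera_images = [] then []
  else
    let min_frames := pvMinLen (camera_images.map (fun p => p.2.length))
    (List.range min_frames).foldl (fun acc i =>
      let frame := camera_images.foldl (fun f p =>
        if i < p.2.length then f.insert p.1 (p.2.getD i "") else f) (PySem.Dict.empty : PySem.Dict String String)
      acc ++ [frame.items]) []

-- ===== PORT B =====
-- 'frames' is None until the first camera; then each camera is zipped against the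
-- partial frames ({**f, name: img}), zip truncating to the shorter side
def pvStep (frames : Option (List (PySem.Dict String String))) (p : String × List String) :
    Option (List (PySem.Dict String String)) :=
  match frames with
  | none => some (p.2.map (fun img => (PySem.Dict.empty : PySem.Dict String String).insert p.1 img))
  | some fs => some ((fs.zip p.2).map (fun q => q.1.insert p.1 q.2))

def synchronize_frames_alt (camera_images : List (String × List String)) : List (List (String × String)) :=
  match camera_images.foldl pvStep (none : Option (List (PySem.Dict String String))) with
  | none => []
  | some fs => fs.map PySem.Dict.items

-- ===== PRECONDITION & SPEC =====
def Spec_synchronize_frames (camera_images : List (String × List String)) (out : List (List (String × String))) : Prop := out = synchronize_frames_alt camera_images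
instance (camera_images : List (String × List String)) (out : List (List (String × String))) : Decidable (Spec_synchronize_frames camera_images out) := by unfold Spec_synchronize_frames; infer_instance

-- ===== CLAIM (what is proved, stated in full; the proofs are below) =====
def Claim_equal_synchronize_frames : Prop := ∀ (camera_images : List (String × List String)), Dom_synchronize_frames camera_images → Spec_synchronize_frames camera_images (synchronize_frames camera_images)

-- ===== LEMMAS AND PROOFS =====

theorem foldl_min_le_init (xs : List Nat) (a : Nat) : xs.foldl Nat.min a ≤ a := by
  induction xs generalizing a with
  | nil => simp
  | cons x t ih => exact le_trans (ih (Nat.min a x)) (Nat.min_le_left a x)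

theorem foldl_min_le_mem (xs : List Nat) (a x : Nat) (hx : x ∈ xs) : xs.foldl Nat.min a ≤ x := by
  induction xs generalizing a with
  | nil => simp at hx
  | cons y t ih =>
    rcases List.mem_cons.mp hx with h | h
    · subst h
      exact le_trans (foldl_min_le_init t (Nat.min a x)) (Nat.min_le_right a x)
    · exact ih (Nat.min a y) h

theorem pvMinLen_le (lens : List Nat) (x : Nat) (hx : x ∈ lens) : pvMinLen lens ≤ x := by
  rcases lens with _ | ⟨n, rest⟩
  · simp at hx
  · show ((n :: rest).foldl Nat.min ((n :: rest).headD 0)) ≤ x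
    simp only [List.headD, List.foldl, Nat.min_self]
    rcases List.mem_cons.mp hx with h | h
    · subst h
      exact foldl_min_le_init rest x
    · exact foldl_min_le_mem rest n x h

theorem pvMinLen_singleton (n : Nat) : pvMinLen [n] = n := by
  simp [pvMinLen]

theorem pvMinLen_append (ls : List Nat) (x : Nat) (h : ls ≠ []) :
    pvMinLen (ls ++ [x]) = Nat.min (pvMinLen ls) x := by
  rcases ls with _ | ⟨n, rest⟩
  · simp at h
  · simp [pvMinLen, List.foldl_append]

-- a list given by indexing equals the map over it
theorem map_eq_range_map (l : List String) (f : String → PySem.Dict String String) :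
    l.map f = (List.range l.length).map (fun i => f (l.getD i "")) := by
  apply List.ext_getElem
  · simp
  · intro i h1 h2
    simp [List.getD_eq_getElem?_getD, List.getElem?_eq_getElem (by simpa using h2)]

-- zipping an indexed list against l truncates the range to the min of the lengths
theorem zip_range_map (m : Nat) (g : Nat → PySem.Dict String String) (l : List String) :
    ((List.range m).map g).zip l
      = (List.range (Nat.min m l.length)).map (fun i => (g i, l.getD i "")) := by
  apply List.ext_getElem
  · simp
  · intro i h1 h2
    have hi : i < Nat.min m l.length := by simpa using h2
    have hil : i < l.length := lt_of_lt_of_le hi (Nat.min_le_right _ _)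
    have him : i < m := lt_of_lt_of_le hi (Nat.min_le_left _ _)
    simp [List.getElem_zip, List.getD_eq_getElem?_getD, List.getElem?_eq_getElem hil]

-- invariant of B's camera fold: after any nonempty prefix cs of cameras, the state is
-- some [frame dict at index i | i < min length over cs], each frame built by A's inner fold
theorem fold_inv (cs : List (String × List String)) (h : cs ≠ []) :
    cs.foldl pvStep none
      = some ((List.range (pvMinLen (cs.map (fun p => p.2.length)))).map
          (fun i => cs.foldl (fun f p => f.insert p.1 (p.2.getD i ""))
            (PySem.Dict.empty : PySem.Dict String String))) := by
  induction cs using List.reverseRecOn with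
  | nil => simp at h
  | append_singleton cs p ih =>
    rcases eq_or_ne cs [] with hcs | hcs
    · subst hcs
      simp only [List.nil_append, List.foldl_cons, List.foldl_nil, pvStep, List.map_cons,
        List.map_nil, pvMinLen_singleton]
      rw [map_eq_range_map]
    · rw [List.foldl_append, ih hcs]
      simp only [pvStep, List.foldl_cons, List.foldl_nil, Option.some.injEq]
      rw [zip_range_map, List.map_map]
      have hm : cs.map (fun p => p.2.length) ≠ [] := by simpa using hcs
      rw [List.map_append, List.map_cons, List.map_nil, pvMinLen_append _ _ hm]
      apply List.map_congr_left
      intro i _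
      simp [List.foldl_append]

-- ===== VERDICT (by name: the statement is the Claim_ definition above) =====
theorem synchronize_frames_spec : Claim_equal_synchronize_frames := by
  unfold Claim_equal_synchronize_frames Spec_synchronize_frames
  intro ci _
  by_cases hci : ci = []
  · subst hci
    simp [synchronize_frames, synchronize_frames_alt]
  · unfold synchronize_frames synchronize_frames_alt
    rw [if_neg hci, fold_inv ci hci]
    simp only [PySem.List.foldl_append_singleton_eq_map, List.nil_append, List.map_map]
    apply List.map_congr_left
    intro i hi
    have him : i < pvMinLen (ci.map (fun p => p.2.length)) := List.mem_range.mp hi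
    -- A's bound guard is always true at i < min_frames
    have hA : ci.foldl (fun f p =>
        if i < p.2.length then f.insert p.1 (p.2.getD i "") else f)
        (PySem.Dict.empty : PySem.Dict String String)
      = ci.foldl (fun f p => f.insert p.1 (p.2.getD i "")) PySem.Dict.empty := by
      apply PySem.List.foldl_congr_mem
      intro acc p hp
      rw [if_pos (lt_of_lt_of_le him (pvMinLen_le _ _ (List.mem_map_of_mem hp)))]
    rw [hA]; rfl
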